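-- pv_equiv track=rewrite | github.com/volcengine/verl | atropos/environments/intern_bootcamp/internbootcamp_lib/internbootcamp/bootcamp/dcolorfulpoints/dcolorfulpoints.py | _calculate_operations
-- ===== SOURCE A (Python) =====
-- from collections import deque
--
-- def _calculate_operations(initial_blocks):
--     blocks = deque(initial_blocks)
--     turns = 0
--
--     while True:
--         remove_mask = [False] * len(blocks)
--
--         # 标记需要删除的块
--         for i in range(len(blocks)):
--             left = i > 0 and blocks[i-1][0] != blocks[i][0]
--             right = i < len(blocks)-1 and blocks[i+1][0] != blocks[i][0]
--             if left or right:
--                 remove_mask[i] = True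
--
--         # 检查是否还有可删除元素
--         if not any(remove_mask):
--             return turns
--
--         # 执行删除并重新构建块结构
--         new_blocks = []
--         for i, (c, l) in enumerate(blocks):
--             if not remove_mask[i]:
--                 new_blocks.append((c, l))
--             else:
--                 if l > 1:
--                     new_blocks.append((c, l-1))
--
--         # 合并相邻同色块
--         merged = []
--         for c, l in new_blocks:
--             if merged and merged[-1][0] == c:
--                 merged[-1] = (c, merged[-1][1] + l)
--             else:
--                 merged.append((c, l))
--
--         # 更新块结构
--         blocks = deque(merged)
--         turns += 1
--
--         # 终止条件：只剩一个块且不需要删除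
--         if len(blocks) == 1 and not remove_mask[0]:
--             return turns
-- ===== SOURCE B (Python) =====
-- def _merge(pairs):
--     out = []
--     for c, l in pairs:
--         if out and out[-1][0] == c:
--             out[-1] = (c, out[-1][1] + l)
--         else:
--             out.append((c, l))
--     return out
--
--
-- def _calculate_operations(initial_blocks):
--     k = len(initial_blocks)
--     colors = [c for c, _ in initial_blocks]
--
--     def flagged(i):
--         return (i > 0 and colors[i - 1] != colors[i]) or \
--                (i + 1 < k and colors[i + 1] != colors[i])
--
--     if not any(flagged(i) for i in range(k)):
--         return 0
--
--     # one ordinary deletion round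
--     survivors = []
--     for i, (c, l) in enumerate(initial_blocks):
--         if not flagged(i):
--             survivors.append((c, l))
--         elif l > 1:
--             survivors.append((c, l - 1))
--     cur = _merge(survivors)
--     turns = 1
--
--     # now adjacent blocks always differ in color, so every remaining round
--     # just shrinks every block by 1; jump ahead by the minimum block length
--     while len(cur) >= 2:
--         d = max(1, min(l for _, l in cur))
--         turns += d
--         cur = _merge([(c, l - d) for c, l in cur if l - d > 0])
--     return turns
-- ===== Notes on version B (the rewrite author's own statement) =====
-- stated objective: faster
-- what changed: A re-simulates every deletion round over all blocks until stable; B performs the one irregular first round, after which adjacent blocks always differ in color, and then jumps d = max(1, min block length) rounds at a time, so its cost is independent of the block lengths.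
import Mathlib
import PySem

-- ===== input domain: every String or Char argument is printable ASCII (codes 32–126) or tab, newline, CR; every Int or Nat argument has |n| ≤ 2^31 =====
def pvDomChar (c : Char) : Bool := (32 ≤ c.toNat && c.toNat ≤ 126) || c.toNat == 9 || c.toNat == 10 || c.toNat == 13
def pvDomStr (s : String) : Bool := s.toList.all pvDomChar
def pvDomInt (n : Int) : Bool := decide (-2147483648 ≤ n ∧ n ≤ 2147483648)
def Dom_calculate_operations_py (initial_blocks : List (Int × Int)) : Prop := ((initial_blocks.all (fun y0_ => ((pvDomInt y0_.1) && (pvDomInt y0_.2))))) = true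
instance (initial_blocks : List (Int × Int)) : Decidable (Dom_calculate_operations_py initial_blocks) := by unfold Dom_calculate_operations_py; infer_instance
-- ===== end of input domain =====

-- B replaces A's round-by-round simulation (O(k · answer)) with one ordinary first round followed
-- by batch jumps of min-block-length rounds at a time (O(k^2), independent of the length values).

-- ===== PORT A =====
-- blocks[i] lookups: every access A makes is guarded in range, so the default is never read
def pvIdxA (blocks : List (Int × Int)) (i : Nat) : Int × Int := blocks.getD i (0, 0)

-- `left or right` of A's marking loop for index i
def pvMaskA (blocks : List (Int × Int)) (i : Nat) : Bool :=
  (decide (0 < i) && decide ((pvIdxA blocks (i - 1)).1 ≠ (pvIdxA blocks i).1)) ||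
  (decide (i + 1 < blocks.length) && decide ((pvIdxA blocks (i + 1)).1 ≠ (pvIdxA blocks i).1))

-- one step of A's `new_blocks` loop (list built back-to-front, reversed at the end)
def pvKeepStep (racc : List (Int × Int)) (pm : (Int × Int) × Bool) : List (Int × Int) :=
  if pm.2 = false then pm.1 :: racc
  else if pm.1.2 > 1 then (pm.1.1, pm.1.2 - 1) :: racc
  else racc

def pvRoundA (blocks : List (Int × Int)) (mask : List Bool) : List (Int × Int) :=
  ((blocks.zip mask).foldl pvKeepStep []).reverse

-- one step of A's `merged` loop (merged[-1] is the head of the reversed accumulator)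
def pvMergeStep (racc : List (Int × Int)) (p : Int × Int) : List (Int × Int) :=
  match racc with
  | (c', l') :: rest => if c' = p.1 then (c', l' + p.2) :: rest else p :: racc
  | [] => [p]

-- termination measure for A's `while True` loop: Σ max(length, 1) over the blocks
def pvM1 (l : Int) : Nat := (max l 1).toNat
def pvMu (blocks : List (Int × Int)) : Nat := (blocks.map (fun p => pvM1 p.2)).sum

theorem pvM1_pos (l : Int) : 1 ≤ pvM1 l := by unfold pvM1; omega

theorem pvMu_nil : pvMu [] = 0 := rfl

theorem pvMu_cons (p : Int × Int) (l : List (Int × Int)) :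
    pvMu (p :: l) = pvM1 p.2 + pvMu l := by
  unfold pvMu; rw [List.map_cons, List.sum_cons]

theorem pvMu_reverse (l : List (Int × Int)) : pvMu l.reverse = pvMu l := by
  unfold pvMu; rw [List.map_reverse, List.sum_reverse]

theorem pvMu_mergeStep_le (racc : List (Int × Int)) (p : Int × Int) :
    pvMu (pvMergeStep racc p) ≤ pvMu racc + pvM1 p.2 := by
  unfold pvMergeStep
  match racc with
  | [] => simp [pvMu_cons, pvMu_nil]
  | (c', l') :: rest =>
    by_cases hc : c' = p.1
    · simp only [hc, if_true, pvMu_cons]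
      have : pvM1 (l' + p.2) ≤ pvM1 l' + pvM1 p.2 := by unfold pvM1; omega
      omega
    · simp only [hc, if_false, pvMu_cons]
      omega

theorem pvMu_mergeFold_le (xs racc : List (Int × Int)) :
    pvMu (xs.foldl pvMergeStep racc) ≤ pvMu racc + pvMu xs := by
  induction xs generalizing racc with
  | nil => simp [pvMu_nil]
  | cons p xs ih =>
    rw [List.foldl_cons, pvMu_cons]
    have h1 := ih (pvMergeStep racc p)
    have h2 := pvMu_mergeStep_le racc p
    omega

theorem pvMu_keepStep_le (racc : List (Int × Int)) (pm : (Int × Int) × Bool) :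
    pvMu (pvKeepStep racc pm) + (if pm.2 = true then 1 else 0) ≤ pvMu racc + pvM1 pm.1.2 := by
  obtain ⟨⟨c, l⟩, m⟩ := pm
  cases m with
  | false => simp [pvKeepStep, pvMu_cons]; omega
  | true =>
    by_cases hl : l > 1
    · simp only [pvKeepStep, hl]
      simp [pvMu_cons]
      have : pvM1 (l - 1) + 1 ≤ pvM1 l := by unfold pvM1; omega
      omega
    · simp only [pvKeepStep, hl]
      simp
      have := pvM1_pos l
      omega

theorem pvMu_keepFold_bound (zs : List ((Int × Int) × Bool)) (racc : List (Int × Int)) :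
    pvMu (zs.foldl pvKeepStep racc) + zs.countP (fun z => z.2) ≤ pvMu racc + pvMu (zs.map Prod.fst) := by
  induction zs generalizing racc with
  | nil => simp [pvMu_nil]
  | cons z zs ih =>
    rw [List.foldl_cons, List.map_cons, pvMu_cons, List.countP_cons]
    have h1 := ih (pvKeepStep racc z)
    have h2 := pvMu_keepStep_le racc z
    by_cases ht : z.2 = true <;> simp only [ht] at * <;> omega

theorem pvMu_keepFold_lt (zs : List ((Int × Int) × Bool)) (racc : List (Int × Int))
    (z : (Int × Int) × Bool) (hz : z ∈ zs) (ht : z.2 = true) :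
    pvMu (zs.foldl pvKeepStep racc) < pvMu racc + pvMu (zs.map Prod.fst) := by
  have hc : 0 < zs.countP (fun z => z.2) := by
    rw [List.countP_pos_iff]
    exact ⟨z, hz, by simp [ht]⟩
  have := pvMu_keepFold_bound zs racc
  omega

-- the measure decreases across one non-returning iteration of A's loop


-- the measure decreases across one non-returning iteration of A's loop
theorem pvMu_decreases (blocks : List (Int × Int))
    (h : ¬ ((List.range blocks.length).map (pvMaskA blocks)).any id = false) :
    pvMu (((pvRoundA blocks ((List.range blocks.length).map (pvMaskA blocks))).foldl pvMergeStep []).reverse)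
      < pvMu blocks := by
  set mask := (List.range blocks.length).map (pvMaskA blocks) with hmask
  have hlen : mask.length = blocks.length := by simp [hmask]
  have hany : mask.any id = true := by revert h; cases mask.any id <;> simp
  rw [List.any_eq_true] at hany
  obtain ⟨x, hx, hxt⟩ := hany
  simp only [id] at hxt
  obtain ⟨i, hi, hxi⟩ := List.mem_iff_getElem.mp hx
  have hib : i < blocks.length := hlen ▸ hi
  have hzlen : i < (blocks.zip mask).length := by simp [List.length_zip]; omega
  have hz : (blocks.zip mask)[i] ∈ blocks.zip mask := List.getElem_mem hzlen
  have hz2 : ((blocks.zip mask)[i]).2 = true := by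
    rw [List.getElem_zip]; simpa [hxi] using hxt
  have h1 : pvMu (((pvRoundA blocks mask).foldl pvMergeStep []).reverse)
      ≤ pvMu (pvRoundA blocks mask) := by
    rw [pvMu_reverse]
    have := pvMu_mergeFold_le (pvRoundA blocks mask) []
    simpa [pvMu_nil] using this
  have h2 : pvMu (pvRoundA blocks mask) < pvMu ((blocks.zip mask).map Prod.fst) := by
    unfold pvRoundA
    rw [pvMu_reverse]
    have := pvMu_keepFold_lt (blocks.zip mask) [] _ hz hz2
    simpa [pvMu_nil] using this
  have h3 : (blocks.zip mask).map Prod.fst = blocks := List.map_fst_zip (by omega)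
  rw [h3] at h2
  omega

-- A's `remove_mask` list
def pvMaskList (blocks : List (Int × Int)) : List Bool :=
  (List.range blocks.length).map (pvMaskA blocks)

-- A's `merged` list after one iteration
def pvMerged (blocks : List (Int × Int)) : List (Int × Int) :=
  ((pvRoundA blocks (pvMaskList blocks)).foldl pvMergeStep []).reverse

-- A's `while True` loop (turns is the running counter)
def pvLoopA (blocks : List (Int × Int)) (turns : Int) : Int :=
  if h : (pvMaskList blocks).any id = false then turns
  else if (pvMerged blocks).length = 1 ∧ (pvMaskList blocks).getD 0 false = false then turns + 1
  else pvLoopA (pvMerged blocks) (turns + 1)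
termination_by pvMu blocks
decreasing_by exact pvMu_decreases blocks h

def calculate_operations_py (initial_blocks : List (Int × Int)) : Int :=
  pvLoopA initial_blocks 0

-- ===== PORT B =====
-- Source B's _merge helper (out[-1] is the head of the reversed accumulator)
def bMergeStep (out : List (Int × Int)) (p : Int × Int) : List (Int × Int) :=
  match out with
  | (c0, l0) :: rest => if c0 = p.1 then (c0, l0 + p.2) :: rest else p :: out
  | [] => [p]

def bMerge (pairs : List (Int × Int)) : List (Int × Int) :=
  (pairs.foldl bMergeStep []).reverse

-- Source B's flagged(i)
def bFlag (colors : List Int) (k : Nat) (i : Nat) : Bool :=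
  (decide (0 < i) && decide (colors.getD (i - 1) 0 ≠ colors.getD i 0)) ||
  (decide (i + 1 < k) && decide (colors.getD (i + 1) 0 ≠ colors.getD i 0))

-- Source B's survivors loop (list built back-to-front, reversed at the end)
def bSurvivors (initial_blocks : List (Int × Int)) (colors : List Int) (k : Nat) : List (Int × Int) :=
  ((initial_blocks.zipIdx.foldl
      (fun racc pi =>
        if bFlag colors k pi.2 = false then pi.1 :: racc
        else if pi.1.2 > 1 then (pi.1.1, pi.1.2 - 1) :: racc
        else racc) []).reverse)

-- Source B's d = max(1, min(l for _, l in cur))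
def bD (cur : List (Int × Int)) : Int := max 1 ((cur.map (fun p => p.2)).min?.getD 1)

-- Source B's [(c, l - d) for c, l in cur if l - d > 0], merged
def bJump (cur : List (Int × Int)) : List (Int × Int) :=
  bMerge (cur.filterMap (fun p => if p.2 - bD cur > 0 then some (p.1, p.2 - bD cur) else none))

theorem bMergeStep_length_le (racc : List (Int × Int)) (p : Int × Int) :
    (bMergeStep racc p).length ≤ racc.length + 1 := by
  unfold bMergeStep
  match racc with
  | [] => simp
  | (c0, l0) :: rest => by_cases hc : c0 = p.1 <;> simp [hc]

theorem bMergeFold_length_le (xs racc : List (Int × Int)) :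
    (xs.foldl bMergeStep racc).length ≤ racc.length + xs.length := by
  induction xs generalizing racc with
  | nil => simp
  | cons p xs ih =>
    rw [List.foldl_cons]
    have h1 := ih (bMergeStep racc p)
    have h2 := bMergeStep_length_le racc p
    simp only [List.length_cons]
    omega

theorem pvFilterMap_length_lt {α β : Type} (f : α → Option β) (l : List α)
    (p : α) (hp : p ∈ l) (hf : f p = none) : (l.filterMap f).length < l.length := by
  induction l with
  | nil => cases hp
  | cons a l ih =>
    rcases List.mem_cons.mp hp with rfl | hmem
    · rw [List.filterMap_cons, hf]
      have := List.length_filterMap_le f l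
      simp only [List.length_cons]
      omega
    · rw [List.filterMap_cons]
      cases hfa : f a with
      | none =>
        have := ih hmem
        simp only [List.length_cons]
        omega
      | some b =>
        have := ih hmem
        simp only [List.length_cons, List.length_cons]
        omega

theorem bLoop_decreases (cur : List (Int × Int)) (h : 2 ≤ cur.length) :
    (bJump cur).length < cur.length := by
  have hcur : cur ≠ [] := by intro hc; subst hc; simp at h
  have hne : cur.map (fun p => p.2) ≠ [] := by simpa using hcur
  cases hmin : (cur.map (fun p => p.2)).min? with
  | none => exact absurd (List.min?_eq_none_iff.mp hmin) hne
  | some m =>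
    obtain ⟨p, hp, hpm⟩ := List.mem_map.mp (List.min?_mem hmin)
    have hd : bD cur = max 1 m := by unfold bD; rw [hmin]; rfl
    have hnone : (fun p : Int × Int => if p.2 - bD cur > 0 then some (p.1, p.2 - bD cur) else none) p = none := by
      have : ¬ (p.2 - bD cur > 0) := by
        rw [hd]; rcases le_or_gt m 1 with h1 | h1
        · have : max 1 m = 1 := by omega
          omega
        · have : max 1 m = m := by omega
          omega
      show (if p.2 - bD cur > 0 then some (p.1, p.2 - bD cur) else none) = none
      rw [if_neg this]
    have h1 : (cur.filterMap (fun p : Int × Int => if p.2 - bD cur > 0 then some (p.1, p.2 - bD cur) else none)).length < cur.length :=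
      pvFilterMap_length_lt _ cur p hp hnone
    unfold bJump bMerge
    rw [List.length_reverse]
    have h2 := bMergeFold_length_le (cur.filterMap (fun p : Int × Int => if p.2 - bD cur > 0 then some (p.1, p.2 - bD cur) else none)) []
    simp only [List.length_nil] at h2
    omega

-- Source B's batch loop: jump d = max(1, min length) rounds at once
def bLoop (cur : List (Int × Int)) (turns : Int) : Int :=
  if h : 2 ≤ cur.length then bLoop (bJump cur) (turns + bD cur)
  else turns
termination_by cur.length
decreasing_by exact bLoop_decreases cur h

-- Source B's `colors` list
def bColors (initial_blocks : List (Int × Int)) : List Int := initial_blocks.map (fun p => p.1)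

def calculate_operations_py_alt (initial_blocks : List (Int × Int)) : Int :=
  if ((List.range initial_blocks.length).map (bFlag (bColors initial_blocks) initial_blocks.length)).any id = false then 0
  else bLoop (bMerge (bSurvivors initial_blocks (bColors initial_blocks) initial_blocks.length)) 1

-- ===== PRECONDITION & SPEC =====
def Spec_calculate_operations_py (initial_blocks : List (Int × Int)) (out : Int) : Prop := out = calculate_operations_py_alt initial_blocks
instance (initial_blocks : List (Int × Int)) (out : Int) : Decidable (Spec_calculate_operations_py initial_blocks out) := by unfold Spec_calculate_operations_py; infer_instance

-- ===== CLAIM (what is proved, stated in full; the proofs are below) =====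
def Claim_equal_calculate_operations_py : Prop := ∀ (initial_blocks : List (Int × Int)), Dom_calculate_operations_py initial_blocks → Spec_calculate_operations_py initial_blocks (calculate_operations_py initial_blocks)

-- ===== LEMMAS AND PROOFS =====

-- adjacent blocks have distinct colors (the shape every merged list has)
def pvCanon (s : List (Int × Int)) : Prop := List.IsChain (fun a b : Int × Int => a.1 ≠ b.1) s

-- decrement-or-drop of one round, once every block is marked
def pvDec1 (p : Int × Int) : Option (Int × Int) :=
  if p.2 > 1 then some (p.1, p.2 - 1) else none

-- decrement-or-drop of d batched rounds (B's comprehension body)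
def pvDecF (d : Int) (p : Int × Int) : Option (Int × Int) :=
  if p.2 - d > 0 then some (p.1, p.2 - d) else none

theorem bJump_eq (cur : List (Int × Int)) :
    bJump cur = bMerge (cur.filterMap (pvDecF (bD cur))) := rfl

-- ## merge-fold facts

theorem mergeFold_sep (xs racc : List (Int × Int)) (hc : pvCanon xs)
    (hsep : ∀ a b, racc.head? = some a → xs.head? = some b → a.1 ≠ b.1) :
    xs.foldl pvMergeStep racc = xs.reverse ++ racc := by
  induction xs generalizing racc with
  | nil => simp
  | cons p xs ih =>
    have hstep : pvMergeStep racc p = p :: racc := by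
      unfold pvMergeStep
      match racc with
      | [] => rfl
      | (c', l') :: rest =>
        have : c' ≠ p.1 := hsep (c', l') p rfl rfl
        simp [this]
    rw [List.foldl_cons, hstep]
    have hcx : pvCanon xs := (List.isChain_cons.mp hc).2
    have hsep' : ∀ a b, (p :: racc).head? = some a → xs.head? = some b → a.1 ≠ b.1 := by
      intro a b ha hb
      simp only [List.head?_cons, Option.some.injEq] at ha
      subst ha
      exact (List.isChain_cons.mp hc).1 b hb
    rw [ih (p :: racc) hcx hsep']
    simp

theorem bMerge_canonical_id (xs : List (Int × Int)) (hc : pvCanon xs) : bMerge xs = xs := by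
  unfold bMerge
  rw [show bMergeStep = pvMergeStep from rfl]
  rw [mergeFold_sep xs [] hc (by intro a b ha; simp at ha)]
  simp

theorem mergeStep_canon (racc : List (Int × Int)) (p : Int × Int)
    (hc : pvCanon racc) : pvCanon (pvMergeStep racc p) := by
  unfold pvMergeStep
  match racc with
  | [] => exact List.isChain_cons.mpr ⟨by simp, List.isChain_nil⟩
  | (c', l') :: rest =>
    by_cases hcp : c' = p.1
    · simp only [hcp, if_true]
      rcases List.isChain_cons.mp hc with ⟨hhd, htl⟩
      exact List.isChain_cons.mpr ⟨by simpa [hcp] using hhd, htl⟩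
    · simp only [hcp, if_false]
      exact List.isChain_cons.mpr ⟨by simp [Ne.symm hcp], hc⟩

theorem mergeFold_canon (xs racc : List (Int × Int)) (hc : pvCanon racc) :
    pvCanon (xs.foldl pvMergeStep racc) := by
  induction xs generalizing racc with
  | nil => exact hc
  | cons p xs ih => exact ih _ (mergeStep_canon racc p hc)

theorem bMerge_canon (xs : List (Int × Int)) : pvCanon (bMerge xs) := by
  unfold bMerge
  rw [show bMergeStep = pvMergeStep from rfl]
  unfold pvCanon
  rw [List.isChain_reverse]
  exact (mergeFold_canon xs [] List.isChain_nil).imp (fun a b h => Ne.symm h)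

-- ## the shape of one of A's rounds on a merged (canonical) state

theorem canon_mask (s : List (Int × Int)) (hc : pvCanon s) (hl : 2 ≤ s.length)
    (i : Nat) (hi : i < s.length) : pvMaskA s i = true := by
  have hchain := List.isChain_iff_getElem.mp hc
  unfold pvMaskA pvIdxA
  cases i with
  | zero =>
    have h1 : 1 < s.length := by omega
    have := hchain 0 (by omega)
    rw [List.getD_eq_getElem s (0,0) h1, List.getD_eq_getElem s (0,0) (by omega : 0 < s.length)]
    simp only [Bool.or_eq_true, Bool.and_eq_true, decide_eq_true_eq]
    right
    exact ⟨by omega, Ne.symm this⟩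
  | succ j =>
    have := hchain j (by omega)
    rw [show j + 1 - 1 = j from rfl]
    rw [List.getD_eq_getElem s (0,0) (by omega : j < s.length), List.getD_eq_getElem s (0,0) hi]
    simp only [Bool.or_eq_true, Bool.and_eq_true, decide_eq_true_eq]
    left
    exact ⟨by omega, this⟩

theorem maskList_replicate (s : List (Int × Int)) (hc : pvCanon s) (hl : 2 ≤ s.length) :
    pvMaskList s = List.replicate s.length true := by
  rw [List.eq_replicate_iff]
  constructor
  · simp [pvMaskList]
  · intro b hb
    unfold pvMaskList at hb
    obtain ⟨i, hir, hbi⟩ := List.mem_map.mp hb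
    rw [← hbi]
    exact canon_mask s hc hl i (List.mem_range.mp hir)

theorem zip_replicate_true (bs : List (Int × Int)) :
    bs.zip (List.replicate bs.length true) = bs.map (fun b => (b, true)) := by
  induction bs with
  | nil => rfl
  | cons b bs ih => simp [List.replicate_succ, ih]

theorem keepFold_all_true (bs : List (Int × Int)) (racc : List (Int × Int)) :
    ((bs.map (fun b => (b, true))).foldl pvKeepStep racc) = (bs.filterMap pvDec1).reverse ++ racc := by
  induction bs generalizing racc with
  | nil => simp
  | cons b bs ih =>
    rw [List.map_cons, List.foldl_cons, List.filterMap_cons]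
    have hstep : pvKeepStep racc (b, true) = if b.2 > 1 then (b.1, b.2 - 1) :: racc else racc := by
      unfold pvKeepStep; simp
    by_cases hb : b.2 > 1
    · rw [hstep]
      simp only [hb, if_true]
      rw [ih ((b.1, b.2 - 1) :: racc)]
      simp [pvDec1, hb]
    · rw [hstep]
      simp only [hb, if_false]
      rw [ih racc]
      simp [pvDec1, hb]

theorem round_eq_filterMap (s : List (Int × Int)) (hc : pvCanon s) (hl : 2 ≤ s.length) :
    pvRoundA s (pvMaskList s) = s.filterMap pvDec1 := by
  unfold pvRoundA
  rw [maskList_replicate s hc hl, zip_replicate_true, keepFold_all_true]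
  simp

theorem merged_eq (s : List (Int × Int)) (hc : pvCanon s) (hl : 2 ≤ s.length) :
    pvMerged s = bMerge (s.filterMap pvDec1) := by
  unfold pvMerged bMerge
  rw [show bMergeStep = pvMergeStep from rfl, round_eq_filterMap s hc hl]

-- ## one canonical round of A, and d of them batched

theorem pvLoopA_base (s : List (Int × Int)) (hl : s.length < 2) (t : Int) :
    pvLoopA s t = t := by
  match s with
  | [] => rw [pvLoopA]; simp [pvMaskList]
  | [p] =>
    rw [pvLoopA]
    have : pvMaskA [p] 0 = false := by simp [pvMaskA]
    simp [pvMaskList, this]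
  | p :: q :: rest => simp at hl

theorem bLoop_base (s : List (Int × Int)) (hl : s.length < 2) (t : Int) :
    bLoop s t = t := by
  rw [bLoop]
  simp [show ¬ (2 ≤ s.length) from by omega]

theorem step1 (s : List (Int × Int)) (hc : pvCanon s) (hl : 2 ≤ s.length) (t : Int) :
    pvLoopA s t = pvLoopA (bMerge (s.filterMap pvDec1)) (t + 1) := by
  rw [pvLoopA]
  have hmask : pvMaskList s = List.replicate s.length true := maskList_replicate s hc hl
  have hany : ¬ ((pvMaskList s).any id = false) := by
    rw [hmask]
    simp [List.any_replicate, show s.length ≠ 0 from by omega]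
  rw [dif_neg hany]
  have hget : (pvMaskList s).getD 0 false = true := by
    rw [hmask]
    match s, hl with
    | p :: q :: rest, _ => simp [List.replicate_succ]
  have hcond : ¬ ((pvMerged s).length = 1 ∧ (pvMaskList s).getD 0 false = false) := by
    intro ⟨_, h2⟩
    rw [hget] at h2
    cases h2
  rw [if_neg hcond, merged_eq s hc hl]

theorem canon_map_dec (s : List (Int × Int)) (hc : pvCanon s) :
    pvCanon (s.map (fun p => (p.1, p.2 - 1))) := by
  unfold pvCanon
  rw [List.isChain_map]
  exact hc

theorem filterMap_dec1_nodrop (s : List (Int × Int)) (h : ∀ p ∈ s, (2:Int) ≤ p.2) :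
    s.filterMap pvDec1 = s.map (fun p => (p.1, p.2 - 1)) := by
  induction s with
  | nil => rfl
  | cons p rest ih =>
    rw [List.filterMap_cons, List.map_cons]
    have hp : p.2 > 1 := by have := h p (by simp); omega
    rw [show pvDec1 p = some (p.1, p.2 - 1) from by simp [pvDec1, hp]]
    rw [ih (fun q hq => h q (by simp [hq]))]

theorem filterMap_decF_map (s : List (Int × Int)) (d : Int) :
    (s.map (fun p => (p.1, p.2 - 1))).filterMap (pvDecF d) = s.filterMap (pvDecF (d + 1)) := by
  rw [List.filterMap_map]
  apply List.filterMap_congr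
  intro p _
  show pvDecF d (p.1, p.2 - 1) = pvDecF (d + 1) p
  unfold pvDecF
  simp only
  rw [show p.2 - 1 - d = p.2 - (d + 1) from by ring]

theorem dec1_eq_decF (s : List (Int × Int)) :
    s.filterMap pvDec1 = s.filterMap (pvDecF 1) := by
  apply List.filterMap_congr
  intro p _
  unfold pvDec1 pvDecF
  by_cases hp : p.2 > 1
  · rw [if_pos hp, if_pos (by omega : p.2 - 1 > 0)]
  · rw [if_neg hp, if_neg (by omega : ¬ (p.2 - 1 > 0))]

theorem descend (n : Nat) : ∀ (s : List (Int × Int)) (t : Int), pvCanon s → 2 ≤ s.length →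
    (∀ p ∈ s, (n : Int) + 1 ≤ p.2) →
    pvLoopA s t = pvLoopA (bMerge (s.filterMap (pvDecF ((n : Int) + 1)))) (t + ((n : Int) + 1)) := by
  induction n with
  | zero =>
    intro s t hc hl _
    rw [step1 s hc hl t, dec1_eq_decF]
    norm_num
  | succ n ih =>
    intro s t hc hl hge
    have hge2 : ∀ p ∈ s, (2:Int) ≤ p.2 := by
      intro p hp
      have := hge p hp
      have : ((n:Int) + 1) + 1 ≤ p.2 := by push_cast at this ⊢; omega
      omega
    have hstep : pvLoopA s t = pvLoopA (s.map (fun p => (p.1, p.2 - 1))) (t + 1) := by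
      rw [step1 s hc hl t, filterMap_dec1_nodrop s hge2,
        bMerge_canonical_id _ (canon_map_dec s hc)]
    have hlen : 2 ≤ (s.map (fun p => (p.1, p.2 - 1))).length := by simpa using hl
    have hge' : ∀ p ∈ s.map (fun p => (p.1, p.2 - 1)), (n : Int) + 1 ≤ p.2 := by
      intro p hp
      obtain ⟨q, hq, rfl⟩ := List.mem_map.mp hp
      have := hge q hq
      push_cast at this ⊢
      omega
    rw [hstep, ih (s.map (fun p => (p.1, p.2 - 1))) (t + 1) (canon_map_dec s hc) hlen hge',
      filterMap_decF_map]
    push_cast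
    ring_nf

-- ## the loops agree on every canonical state

theorem loop_eq (N : Nat) : ∀ (s : List (Int × Int)), s.length ≤ N → pvCanon s →
    ∀ (t : Int), pvLoopA s t = bLoop s t := by
  induction N with
  | zero =>
    intro s hN _ t
    rw [pvLoopA_base s (by omega) t, bLoop_base s (by omega) t]
  | succ N ih =>
    intro s hN hc t
    by_cases hl : 2 ≤ s.length
    · have hcur : s ≠ [] := by intro hc'; subst hc'; simp at hl
      cases hmin : (s.map (fun p => p.2)).min? with
      | none => exact absurd (List.min?_eq_none_iff.mp hmin) (by simpa using hcur)
      | some m =>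
        have hle : ∀ p ∈ s, m ≤ p.2 := by
          rw [List.min?_eq_some_iff] at hmin
          exact fun p hp => hmin.2 _ (List.mem_map_of_mem hp)
        have hd : bD s = max 1 m := by unfold bD; rw [hmin]; rfl
        have hBstep : bLoop s t = bLoop (bJump s) (t + bD s) := by
          rw [bLoop]; rw [dif_pos hl]
        have hlen' : (bJump s).length ≤ N := by
          have := bLoop_decreases s hl
          omega
        have hcanon' : pvCanon (bJump s) := by rw [bJump_eq]; exact bMerge_canon _
        rcases le_or_gt m 1 with hm | hm
        · have hd1 : bD s = 1 := by rw [hd]; omega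
          have hA : pvLoopA s t = pvLoopA (bJump s) (t + 1) := by
            rw [step1 s hc hl t, dec1_eq_decF, bJump_eq, hd1]
          rw [hA, hBstep, hd1, ih (bJump s) hlen' hcanon' (t + 1)]
        · have hdm : bD s = m := by rw [hd]; omega
          have hn : ((m.toNat - 1 : Nat) : Int) + 1 = m := by omega
          have hA := descend (m.toNat - 1) s t hc hl (by intro p hp; rw [hn]; exact hle p hp)
          rw [hn] at hA
          have e : bJump s = bMerge (s.filterMap (pvDecF m)) := by rw [bJump_eq, hdm]
          rw [hA, hBstep, hdm, ← e]
          exact ih (bJump s) hlen' hcanon' (t + m)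
    · rw [pvLoopA_base s (by omega) t, bLoop_base s (by omega) t]

-- ## A's first (not necessarily canonical) round is B's first round

theorem getD_map_fst (s : List (Int × Int)) (j : Nat) :
    (s.map (fun p => p.1)).getD j 0 = (pvIdxA s j).1 := by
  unfold pvIdxA
  induction s generalizing j with
  | nil => simp
  | cons p rest ih =>
    cases j with
    | zero => simp
    | succ i => simpa using ih i

theorem mask_flag (s : List (Int × Int)) (i : Nat) :
    pvMaskA s i = bFlag (s.map (fun p => p.1)) s.length i := by
  unfold pvMaskA bFlag
  rw [getD_map_fst, getD_map_fst, getD_map_fst]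

theorem flags_eq (s : List (Int × Int)) :
    pvMaskList s = (List.range s.length).map (bFlag (s.map (fun p => p.1)) s.length) := by
  unfold pvMaskList
  exact List.map_congr_left (fun i _ => mask_flag s i)

theorem zip_range_map (bs : List (Int × Int)) (g : Nat → Bool) : ∀ (st : Nat),
    bs.zip ((List.range' st bs.length).map g) = (bs.zipIdx st).map (fun pi => (pi.1, g pi.2)) := by
  induction bs with
  | nil => intro st; rfl
  | cons b bs ih =>
    intro st
    rw [List.length_cons, List.range'_succ, List.map_cons, List.zip_cons_cons,
      List.zipIdx_cons, List.map_cons, ih (st + 1)]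

theorem survivors_eq (s : List (Int × Int)) :
    bSurvivors s (s.map (fun p => p.1)) s.length = pvRoundA s (pvMaskList s) := by
  unfold bSurvivors pvRoundA pvMaskList
  rw [List.range_eq_range', zip_range_map s (pvMaskA s) 0, List.foldl_map]
  congr 2
  funext racc pi
  simp only [pvKeepStep, ← mask_flag s pi.2]

theorem main_claim : ∀ (initial_blocks : List (Int × Int)),
    calculate_operations_py initial_blocks = calculate_operations_py_alt initial_blocks := by
  intro s
  unfold calculate_operations_py calculate_operations_py_alt bColors
  rw [pvLoopA]
  rw [← flags_eq s]
  by_cases hany : (pvMaskList s).any id = false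
  · rw [dif_pos hany, if_pos hany]
  · rw [dif_neg hany, if_neg hany]
    have hmg : bMerge (bSurvivors s (s.map (fun p => p.1)) s.length) = pvMerged s := by
      rw [survivors_eq s]
      unfold bMerge pvMerged
      rw [show bMergeStep = pvMergeStep from rfl]
    rw [hmg]
    have hcanon : pvCanon (pvMerged s) := by
      unfold pvMerged
      have : ((pvRoundA s (pvMaskList s)).foldl pvMergeStep []).reverse
          = bMerge (pvRoundA s (pvMaskList s)) := by
        unfold bMerge; rw [show bMergeStep = pvMergeStep from rfl]
      rw [this]
      exact bMerge_canon _
    by_cases hearly : (pvMerged s).length = 1 ∧ (pvMaskList s).getD 0 false = false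
    · rw [if_pos hearly]
      rw [bLoop_base (pvMerged s) (by omega) 1]
      norm_num
    · rw [if_neg hearly, show (0 : Int) + 1 = 1 from by norm_num]
      rw [loop_eq (pvMerged s).length (pvMerged s) (le_refl _) hcanon 1]

-- ===== VERDICT (by name: the statement is the Claim_ definition above) =====
theorem calculate_operations_py_spec : Claim_equal_calculate_operations_py := by
  intro s _
  unfold Spec_calculate_operations_py
  exact main_claim s
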